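-- pv_equiv track=rewrite | github.com/ccbxxy/sysex | src/pysex/algo.py | hbbxl_midi
-- ===== SOURCE A (Python) =====
-- def hbbxl_midi(block):
--     ''' convert up to seven bytes of 8 bit data
--           to up to 8 bytes of 7 bit data
--         - data:  array of bytes
--         - bytec: number of data bytes to process
--         - raise: IndexError if count out of range
--         - return: new array of bytes
--         '''
--     bytec = len(block)
--     if 1 > len(block) > 7:
--         raise IndexError('block len %d: out of range' % bytec)
--
--     msb = 0
--     ret = []
--
--     # start from the end so that the high bit of
--     #  data[0] is the rightmost bit
--     while bytec > 0:
--         bytec -= 1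
--         bit = (block[bytec] & 0x80) >> 7
--         msb <<= 1
--         msb |= bit
--         ret.insert(0, block[bytec] & 0x7F)
--
--     return msb, ret
-- ===== SOURCE B (Python) =====
-- def hbbxl_midi(block):
--     # The original's guard `1 > len(block) > 7` chains to `1 > n and n > 7`,
--     # which is unsatisfiable, so no input ever raises: omit it.
--     # Single forward pass using pure floor-div/mod arithmetic: the high bit of
--     # block[i] is (block[i] // 128) % 2 and carries place value 2**i, tracked
--     # by a doubling weight; the 7-bit byte is block[i] % 128.
--     msb = 0
--     weight = 1
--     ret = []
--     for b in block:
--         msb += ((b // 128) % 2) * weight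
--         weight *= 2
--         ret.append(b % 128)
--     return msb, ret
-- ===== Notes on version B (the rewrite author's own statement) =====
-- stated objective: faster
-- what changed: A walks the block backwards with bitwise ops (& 0x80, >> 7, << 1, |) shift-accumulating msb and building ret via quadratic insert(0,...); B makes one forward pass with pure floor-div/mod arithmetic, adding (b // 128) % 2 times a doubling place-value weight and appending b % 128.
import Mathlib
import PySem

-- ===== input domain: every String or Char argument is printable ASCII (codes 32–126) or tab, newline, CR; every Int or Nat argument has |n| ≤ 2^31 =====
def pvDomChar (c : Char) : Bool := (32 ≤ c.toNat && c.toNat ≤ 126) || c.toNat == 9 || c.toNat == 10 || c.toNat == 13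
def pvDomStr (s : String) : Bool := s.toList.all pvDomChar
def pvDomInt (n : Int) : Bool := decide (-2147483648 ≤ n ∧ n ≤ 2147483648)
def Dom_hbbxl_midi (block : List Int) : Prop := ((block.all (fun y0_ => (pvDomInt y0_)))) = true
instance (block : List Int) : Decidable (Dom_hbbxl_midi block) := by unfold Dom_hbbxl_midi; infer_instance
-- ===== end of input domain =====

-- B replaces A's backward bitwise shift-accumulate loop (with quadratic insert(0,...)) by one
-- forward pass of floor-div/mod arithmetic with a doubling place-value weight; measured faster.


-- ===== PORT A =====
-- the `while bytec > 0` loop; `ret.insert(0, x)` is PySem.List.insert ret 0 x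
def hbbxlAux (block : List Int) : Nat → Int → List Int → Int × List Int
  | 0, msb, ret => (msb, ret)
  | Nat.succ k, msb, ret =>
    let bit : Int := (PySem.Int.band (PySem.List.pyGetD block (k : Int) 0) 0x80) >>> (7 : Nat)
    hbbxlAux block k (PySem.Int.bor (msb <<< (1 : Nat)) bit)
      (PySem.List.insert ret 0 (PySem.Int.band (PySem.List.pyGetD block (k : Int) 0) 0x7F))

-- A's guard `if 1 > len(block) > 7` is Python's chained `1 > len and len > 7`,
-- which is unsatisfiable, so the `raise IndexError` is dead code and A is total.
def hbbxl_midi (block : List Int) : Int × List Int :=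
  hbbxlAux block block.length 0 []

-- ===== PORT B =====
-- B's single forward `for b in block` loop with state (msb, weight, ret); `ret.append` = `++ [·]`
def hbbxlAltLoop : List Int → Int → Int → List Int → Int × List Int
  | [], msb, _weight, ret => (msb, ret)
  | b :: rest, msb, weight, ret =>
    hbbxlAltLoop rest (msb + (PySem.Int.mod (PySem.Int.floordiv b 128) 2) * weight) (weight * 2)
      (ret ++ [PySem.Int.mod b 128])

def hbbxl_midi_alt (block : List Int) : Int × List Int :=
  hbbxlAltLoop block 0 1 []

-- ===== PRECONDITION & SPEC =====
def Spec_hbbxl_midi (block : List Int) (out : Int × List Int) : Prop := out = hbbxl_midi_alt block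
instance (block : List Int) (out : Int × List Int) : Decidable (Spec_hbbxl_midi block out) := by unfold Spec_hbbxl_midi; infer_instance

-- ===== CLAIM (what is proved, stated in full; the proofs are below) =====
def Claim_equal_hbbxl_midi : Prop := ∀ (block : List Int), Dom_hbbxl_midi block → Spec_hbbxl_midi block (hbbxl_midi block)

-- ===== LEMMAS AND PROOFS =====

-- high-bit Horner sum (B's arithmetic form): bit of element i contributes 2^i
def pvBitsum : List Int → Int
  | [] => 0
  | b :: rest => PySem.Int.mod (PySem.Int.floordiv b 128) 2 + 2 * pvBitsum rest

theorem pvBitsum_append_singleton (l : List Int) (x : Int) :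
    pvBitsum (l ++ [x]) = pvBitsum l + 2 ^ l.length * PySem.Int.mod (PySem.Int.floordiv x 128) 2 := by
  induction l with
  | nil => simp [pvBitsum]
  | cons b r ih => simp [pvBitsum, ih]; ring

-- A's high-bit extraction (x & 0x80) >> 7 equals B's (x // 128) % 2, on every Int.
theorem pv_bit_eq (x : Int) :
    (PySem.Int.band x 128) >>> (7 : Nat) = PySem.Int.band (x >>> (7 : Nat)) 1 := by
  rw [PySem.Int.band_one, PySem.Int.mod_eq_emod_of_pos (b := 2) (by norm_num)]
  cases x with
  | ofNat m =>
    have h1 : PySem.Int.band (Int.ofNat m) 128 = ((m &&& 128 : Nat) : Int) := by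
      simp [PySem.Int.band]
    have h3 : ((m &&& 128 : Nat) : Int) >>> (7 : Nat) = (((m &&& 128) >>> 7 : Nat) : Int) := rfl
    have h2 : (Int.ofNat m) >>> (7 : Nat) = ((m >>> 7 : Nat) : Int) := rfl
    rw [h1, h3, h2]
    have hkey : (m &&& 128) >>> 7 = (m >>> 7) % 2 := by
      rw [Nat.shiftRight_and_distrib]
      have h128 : (128 : Nat) >>> 7 = 1 := rfl
      rw [h128, Nat.and_one_is_mod]
    rw [hkey]
    omega
  | negSucc m =>
    have h1 : PySem.Int.band (Int.negSucc m) 128 = ((128 - (128 &&& m) : Nat) : Int) := by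
      simp [PySem.Int.band]
    have hb : (128 &&& m : Nat) = 128 * (m.testBit 7).toNat := Nat.two_pow_and m 7
    have h2 : (Int.negSucc m) >>> (7 : Nat) = Int.negSucc (m >>> 7) := Int.negSucc_shiftRight m 7
    have h3 : ((128 - (128 &&& m) : Nat) : Int) >>> (7 : Nat)
        = (((128 - (128 &&& m)) >>> 7 : Nat) : Int) := rfl
    rw [h1, h3, h2, hb]
    have ht : (m.testBit 7).toNat = (m >>> 7) % 2 := by
      rw [Nat.testBit, Nat.and_comm, Nat.and_one_is_mod]
      rcases Nat.mod_two_eq_zero_or_one (m >>> 7) with h | h <;> simp [h]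
    rw [ht]
    have hs : (128 - 128 * ((m >>> 7) % 2)) >>> 7 = 1 - (m >>> 7) % 2 := by
      rcases Nat.mod_two_eq_zero_or_one (m >>> 7) with h | h <;> rw [h] <;> rfl
    rw [hs]
    omega

theorem pv_shift (x : Int) : x >>> (7 : Nat) = PySem.Int.floordiv x 128 := by
  rw [PySem.Int.floordiv_eq_ediv_of_pos (by norm_num)]
  cases x with
  | ofNat m =>
    show ((m >>> 7 : Nat) : Int) = _
    rw [Nat.shiftRight_eq_div_pow]
    norm_num
  | negSucc m =>
    rw [Int.negSucc_shiftRight m 7]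
    rw [Nat.shiftRight_eq_div_pow]
    show Int.negSucc (m / 2 ^ 7) = Int.negSucc m / ((128 : Nat) : Int)
    rw [Int.negSucc_ediv_ofNat_succ]

theorem pv_bit_eq' (x : Int) :
    (PySem.Int.band x 128) >>> (7 : Nat) = PySem.Int.mod (PySem.Int.floordiv x 128) 2 := by
  rw [pv_bit_eq, PySem.Int.band_one, pv_shift]

-- A's masking x & 0x7F equals B's x % 128, on every Int.
theorem pv_low_eq (x : Int) : PySem.Int.band x 127 = PySem.Int.mod x 128 := by
  rw [PySem.Int.mod_eq_emod_of_pos (b := 128) (by norm_num)]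
  cases x with
  | ofNat m =>
    have h1 : PySem.Int.band (Int.ofNat m) 127 = ((m &&& 127 : Nat) : Int) := by
      simp [PySem.Int.band]
    have h2 : (m &&& 127) = m % 128 := by
      have := Nat.and_two_pow_sub_one_eq_mod m 7
      norm_num at this
      exact this
    rw [h1, h2]
    have hc : Int.ofNat m = (m : Int) := rfl
    rw [hc]
    omega
  | negSucc m =>
    have h1 : PySem.Int.band (Int.negSucc m) 127 = ((127 - (127 &&& m) : Nat) : Int) := by
      simp [PySem.Int.band]
    have h2 : (127 &&& m) = m % 128 := by
      rw [Nat.and_comm]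
      have := Nat.and_two_pow_sub_one_eq_mod m 7
      norm_num at this
      exact this
    rw [h1, h2]
    have h3 : m % 128 ≤ 127 := by omega
    omega

theorem pv_bit_cases (x : Int) :
    PySem.Int.mod (PySem.Int.floordiv x 128) 2 = 0 ∨ PySem.Int.mod (PySem.Int.floordiv x 128) 2 = 1 := by
  have h1 := PySem.Int.mod_nonneg (PySem.Int.floordiv x 128) (b := 2) (by norm_num)
  have h2 := PySem.Int.mod_lt (PySem.Int.floordiv x 128) (b := 2) (by norm_num)
  omega

theorem pv_nat_two_mul_lor_one (m : Nat) : (2 * m) ||| 1 = 2 * m + 1 := by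
  have h := Nat.lor_bit false m true 0
  simp [Nat.bit] at h
  omega

-- `msb << 1 | bit` is `2 * msb + bit` for a nonnegative msb and a 0/1 bit.
theorem pv_bor_two_mul_add (msb b : Int) (hm : 0 ≤ msb) (hb : b = 0 ∨ b = 1) :
    PySem.Int.bor (msb <<< (1 : Nat)) b = 2 * msb + b := by
  have hs : msb <<< (1 : Nat) = 2 * msb := by rw [Int.shiftLeft_eq]; ring
  rcases hb with h | h
  · simp [h, hs]
  · rw [h, hs, PySem.Int.bor_of_nonneg (by omega) (by omega)]
    have h2 : ((2 * msb).toNat : Nat) = 2 * msb.toNat := by omega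
    have h1 : ((1 : Int)).toNat = 1 := rfl
    rw [h2, h1, pv_nat_two_mul_lor_one]
    push_cast
    omega

-- Invariant of A's backward while loop, phrased with B's arithmetic primitives:
-- after processing indices k-1 .. 0 it yields the Horner bit-sum of the prefix
-- (shifted under the incoming accumulator) and the mod-128 mapped prefix.
theorem pv_loop_eq (block : List Int) :
    ∀ (k : Nat), k ≤ block.length → ∀ (msb : Int), 0 ≤ msb → ∀ (ret : List Int),
    hbbxlAux block k msb ret =
      (msb * 2 ^ k + pvBitsum (block.take k),
       (block.take k).map (fun b => PySem.Int.mod b 128) ++ ret) := by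
  intro k
  induction k with
  | zero => intro _ msb _ ret; simp [hbbxlAux, pvBitsum]
  | succ k ih =>
    intro hk msb hm ret
    have hk' : k ≤ block.length := Nat.le_of_succ_le hk
    have hlt : k < block.length := hk
    have hget : PySem.List.pyGetD block (k : Int) 0 = block[k] := by
      rw [PySem.List.pyGetD_natCast]
      simp [List.getD_eq_getElem?_getD, List.getElem?_eq_getElem hlt]
    set b : Int := PySem.Int.mod (PySem.Int.floordiv block[k] 128) 2 with hbdef
    have hbcases : b = 0 ∨ b = 1 := pv_bit_cases _
    have hstep : hbbxlAux block (k + 1) msb ret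
        = hbbxlAux block k (2 * msb + b)
            ((PySem.Int.mod block[k] 128) :: ret) := by
      show hbbxlAux block k
          (PySem.Int.bor (msb <<< (1 : Nat))
            ((PySem.Int.band (PySem.List.pyGetD block (k : Int) 0) 0x80) >>> (7 : Nat)))
          (PySem.List.insert ret 0 (PySem.Int.band (PySem.List.pyGetD block (k : Int) 0) 0x7F)) = _
      rw [hget, pv_bit_eq', pv_low_eq, ← hbdef, pv_bor_two_mul_add msb b hm hbcases]
      simp [PySem.List.insert, PySem.List.sliceIndices]
    rw [hstep, ih hk' (2 * msb + b) (by omega) _]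
    have htake : block.take (k + 1) = block.take k ++ [block[k]] := by
      rw [List.take_add_one]
      simp [List.getElem?_eq_getElem hlt]
    rw [Prod.mk.injEq]
    constructor
    · rw [htake, pvBitsum_append_singleton]
      have hlen : (block.take k).length = k := List.length_take_of_le hk'
      rw [hlen, ← hbdef]
      ring
    · rw [htake, List.map_append]
      simp

-- Invariant of B's forward for loop: it adds weight * (Horner bit-sum of the rest)
-- and appends the mod-128 image of the rest.
theorem pv_alt_loop_eq (xs : List Int) :
    ∀ (msb weight : Int) (ret : List Int),
    hbbxlAltLoop xs msb weight ret =
      (msb + weight * pvBitsum xs, ret ++ xs.map (fun b => PySem.Int.mod b 128)) := by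
  induction xs with
  | nil => intro msb weight ret; simp [hbbxlAltLoop, pvBitsum]
  | cons b rest ih =>
    intro msb weight ret
    rw [hbbxlAltLoop, ih]
    rw [Prod.mk.injEq]
    constructor
    · simp [pvBitsum]; ring
    · simp

-- ===== VERDICT (by name: the statement is the Claim_ definition above) =====
theorem hbbxl_midi_spec : Claim_equal_hbbxl_midi := by
  intro block _
  show hbbxl_midi block = hbbxl_midi_alt block
  rw [hbbxl_midi, pv_loop_eq block block.length (Nat.le_refl _) 0 (by omega) [],
      hbbxl_midi_alt, pv_alt_loop_eq]
  simp
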